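-- pv_equiv track=rewrite | github.com/Leonardo-villagran/reclip | app.py | summarize_ffmpeg_error
-- ===== SOURCE A (Python) =====
-- def summarize_ffmpeg_error(stderr_text):
--     lines = [line.strip() for line in (stderr_text or "").splitlines() if line.strip()]
--     if not lines:
--         return "FFmpeg conversion failed"
--     for line in reversed(lines):
--         lower = line.lower()
--         if "error" in lower or "failed" in lower or "cannot" in lower:
--             return line
--     return lines[-1]
-- ===== SOURCE B (Python) =====
-- def summarize_ffmpeg_error(stderr_text):
--     last_line = None
--     last_match = None
--     for raw in (stderr_text or "").splitlines():
--         line = raw.strip()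
--         if not line:
--             continue
--         last_line = line
--         low = line.lower()
--         if "error" in low or "failed" in low or "cannot" in low:
--             last_match = line
--     if last_line is None:
--         return "FFmpeg conversion failed"
--     return last_match if last_match is not None else last_line
-- ===== Notes on version B (the rewrite author's own statement) =====
-- stated objective: alternative
-- what changed: Replaces A's build-list-then-reverse-scan with a single streaming pass that keeps two registers (last non-empty line, last keyword-matching line) and never materializes the line list.
import Mathlib
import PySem

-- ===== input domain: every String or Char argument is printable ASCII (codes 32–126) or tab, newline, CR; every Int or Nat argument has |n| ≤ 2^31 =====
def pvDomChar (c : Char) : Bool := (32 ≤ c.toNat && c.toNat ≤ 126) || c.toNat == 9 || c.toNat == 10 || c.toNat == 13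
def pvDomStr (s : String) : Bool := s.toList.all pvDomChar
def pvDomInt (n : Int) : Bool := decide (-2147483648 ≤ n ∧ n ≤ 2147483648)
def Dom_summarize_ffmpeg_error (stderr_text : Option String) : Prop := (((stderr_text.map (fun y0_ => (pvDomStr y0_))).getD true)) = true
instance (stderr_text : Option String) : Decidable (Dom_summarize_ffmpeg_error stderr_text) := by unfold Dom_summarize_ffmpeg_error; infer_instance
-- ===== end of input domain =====

-- B replaces A's build-list-then-reverse-scan with a single streaming pass keeping two registers
-- (last non-empty line, last keyword match); alternative decomposition, same cost.

-- ===== PORT A =====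
-- reverse early-exit scan: return the first line (from the end) whose lowercase contains a keyword
def pvAKeyword (line : String) : Bool :=
  let lower := PySem.Str.lower line
  PySem.Str.isIn "error" lower || PySem.Str.isIn "failed" lower || PySem.Str.isIn "cannot" lower

def pvAScan : List String → String → String
  | [], dflt => dflt
  | line :: rest, dflt => if pvAKeyword line then line else pvAScan rest dflt

def summarize_ffmpeg_error (stderr_text : Option String) : String :=
  let lines := ((PySem.Str.splitlines (stderr_text.getD "")).map PySem.Str.strip).filter
    (fun t => t ≠ "")
  if lines = [] then "FFmpeg conversion failed"
  else pvAScan lines.reverse (PySem.List.pyGetD lines (-1) "")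

-- ===== PORT B =====
-- keyword test on one line (B checks the three substrings of the lowered line)
def pvBKw (line : String) : Bool :=
  let low := PySem.Str.lower line
  PySem.Str.isIn "error" low || PySem.Str.isIn "failed" low || PySem.Str.isIn "cannot" low

-- one loop step: skip blank lines, otherwise update the two registers
def pvBStep (s : Option String × Option String) (raw : String) : Option String × Option String :=
  let line := PySem.Str.strip raw
  if line = "" then s
  else (some line, if pvBKw line then some line else s.2)

def summarize_ffmpeg_error_alt (stderr_text : Option String) : String :=
  let st := (PySem.Str.splitlines (stderr_text.getD "")).foldl pvBStep (none, none)
  match st.1 with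
  | none => "FFmpeg conversion failed"
  | some last_line =>
    match st.2 with
    | some m => m
    | none => last_line

-- ===== PRECONDITION & SPEC =====
def Spec_summarize_ffmpeg_error (stderr_text : Option String) (out : String) : Prop := out = summarize_ffmpeg_error_alt stderr_text
instance (stderr_text : Option String) (out : String) : Decidable (Spec_summarize_ffmpeg_error stderr_text out) := by unfold Spec_summarize_ffmpeg_error; infer_instance

-- ===== CLAIM (what is proved, stated in full; the proofs are below) =====
def Claim_equal_summarize_ffmpeg_error : Prop := ∀ (stderr_text : Option String), Dom_summarize_ffmpeg_error stderr_text → Spec_summarize_ffmpeg_error stderr_text (summarize_ffmpeg_error stderr_text)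

-- ===== LEMMAS AND PROOFS =====

theorem pvBKw_eq (line : String) : pvBKw line = pvAKeyword line := rfl

-- folding B's step over the raw lines = folding the non-blank update over the stripped non-empty lines
theorem pvB_fold_raw (l : List String) (s : Option String × Option String) :
    l.foldl pvBStep s =
    ((l.map PySem.Str.strip).filter (fun t => t ≠ "")).foldl
      (fun s line => (some line, if pvBKw line then some line else s.2)) s := by
  induction l generalizing s with
  | nil => rfl
  | cons x xs ih =>
    by_cases h : PySem.Str.strip x = "" <;>
      simp [pvBStep, h, ih]

-- the register fold computes (last line, last keyword match) with Option.or over the initial state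
theorem pvB_fold_lines (lines : List String) (a b : Option String) :
    lines.foldl (fun s line => (some line, if pvBKw line then some line else s.2)) (a, b) =
    (Option.or lines.getLast? a, Option.or ((lines.filter pvBKw).getLast?) b) := by
  induction lines generalizing a b with
  | nil => simp
  | cons x xs ih =>
    rw [List.foldl_cons, ih]
    by_cases h : pvBKw x = true <;>
      cases hx : xs.getLast? <;>
      cases hf : (xs.filter pvBKw).getLast? <;>
      simp [h, List.getLast?_cons, hx, hf, Option.or]

-- A's reverse scan returns the first match of the scanned list, else the default
theorem pvAScan_eq (ys : List String) (d : String) :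
    pvAScan ys d = ((ys.filter pvAKeyword).head?).getD d := by
  induction ys with
  | nil => simp [pvAScan]
  | cons y ys ih =>
    by_cases h : pvAKeyword y = true
    · simp [pvAScan, h]
    · simp [pvAScan, h, ih]

-- ===== VERDICT (by name: the statement is the Claim_ definition above) =====
theorem summarize_ffmpeg_error_spec : Claim_equal_summarize_ffmpeg_error := by
  intro stderr_text _
  unfold Spec_summarize_ffmpeg_error summarize_ffmpeg_error summarize_ffmpeg_error_alt
  rw [pvB_fold_raw, pvB_fold_lines]
  set lines := ((PySem.Str.splitlines (stderr_text.getD "")).map PySem.Str.strip).filter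
      (fun t => decide (t ≠ "")) with hl
  by_cases hnil : lines = []
  · simp [hnil]
  · simp only [hnil, if_false]
    rw [pvAScan_eq, List.filter_reverse, List.head?_reverse]
    have hfe : lines.filter pvBKw = lines.filter pvAKeyword := by
      simp [List.filter_congr, pvBKw_eq]
    rw [hfe]
    cases hll : lines.getLast? with
    | none => exact absurd (List.getLast?_eq_none_iff.mp hll) hnil
    | some last =>
      cases hm : (lines.filter pvAKeyword).getLast? with
      | none =>
        simp only [Option.or, Option.getD_none]
        rw [PySem.List.pyGetD_neg_one _ "" hnil]
        have := List.getLast?_eq_some_getLast (l := lines) (h := hnil)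
        rw [this] at hll
        exact Option.some.inj hll
      | some m => simp [Option.or]
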